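-- pv_equiv track=rewrite | github.com/Lililililililililililiiliilil/backend-yandex-internship | plane.py | place_pass
-- ===== SOURCE A (Python) =====
-- def place_pass(pos, side, num, row):
--     row = list(row)
--     place_letter = {0: 'A', 1: 'B', 2: 'C', 4: 'D', 5: 'E', 6: 'F'}
--     places = []
--     if side == 'left' and pos == 'aisle':
--         for i in range(2, 3 - num - 1, -1):
--             row[i] = 'X'
--             places.append(i)
--     elif side == 'left' and pos == 'window':
--         for i in range(num):
--             row[i] = 'X'
--             places.append(i)
--     if side == 'right' and pos == 'aisle':
--         for i in range(4, 4 + num):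
--             row[i] = 'X'
--             places.append(i)
--     elif side == 'right' and pos == 'window':
--         for i in range(6, 6 - num, -1):
--             row[i] = 'X'
--             places.append(i)
--     places.sort()
--     for i in range(len(places)):
--         places[i] = place_letter[places[i]]
--     return ''.join(row), places
-- ===== SOURCE B (Python) =====
-- def place_pass(pos, side, num, row):
--     n = num if num > 0 else 0
--     spans = {('left', 'aisle'): (3 - n, 3), ('left', 'window'): (0, n),
--              ('right', 'aisle'): (4, 4 + n), ('right', 'window'): (7 - n, 7)}
--     lo, hi = spans.get((side, pos), (0, 0))
--     letters = ['ABC DEF'[p] for p in range(lo, hi)]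
--     cabin = ''.join('X' if lo <= i < hi else s for i, s in enumerate(row))
--     return cabin, letters
-- ===== Notes on version B (the rewrite author's own statement) =====
-- stated objective: simpler
-- what changed: Replaces A's four per-branch in-place mutation loops plus a sort and an in-place letter rewrite by a (side,pos)->(lo,hi) span table, one enumerate pass that builds the marked row directly, and a letter table string indexed by seat number (the span is produced already sorted, so the sort disappears).
import Mathlib
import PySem

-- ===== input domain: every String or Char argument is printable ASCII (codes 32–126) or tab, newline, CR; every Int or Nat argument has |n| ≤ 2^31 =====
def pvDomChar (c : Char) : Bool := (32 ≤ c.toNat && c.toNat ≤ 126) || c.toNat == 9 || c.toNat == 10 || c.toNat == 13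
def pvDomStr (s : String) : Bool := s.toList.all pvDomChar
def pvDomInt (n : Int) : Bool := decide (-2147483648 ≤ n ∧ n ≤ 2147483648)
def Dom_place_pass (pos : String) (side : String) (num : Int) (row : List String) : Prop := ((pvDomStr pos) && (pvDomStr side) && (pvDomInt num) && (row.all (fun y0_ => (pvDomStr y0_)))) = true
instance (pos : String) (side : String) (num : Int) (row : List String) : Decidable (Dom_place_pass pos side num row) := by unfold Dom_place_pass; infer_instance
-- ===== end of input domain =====

-- B replaces A's four per-branch mutation loops by one (lo,hi) span table, a single
-- enumerate pass over the row, and a letter table string — simpler decomposition, same cost.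

-- ===== PORT A =====
def place_pass (pos : String) (side : String) (num : Int) (row : List String) : String × List String :=
  let place_letter : PySem.Dict Int String :=
    PySem.Dict.ofList [(0, "A"), (1, "B"), (2, "C"), (4, "D"), (5, "E"), (6, "F")]
  -- each loop body is 'row[i] = "X"; places.append(i)' on the pair state (row, places)
  let st1 : List String × List Int :=
    if side = "left" ∧ pos = "aisle" then
      (PySem.List.pyRange 2 (3 - num - 1) (-1)).foldl
        (fun st i => (PySem.List.pySetD st.1 i "X", st.2 ++ [i])) (row, [])
    else if side = "left" ∧ pos = "window" then
      (PySem.List.pyRange 0 num 1).foldl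
        (fun st i => (PySem.List.pySetD st.1 i "X", st.2 ++ [i])) (row, [])
    else (row, [])
  let st2 : List String × List Int :=
    if side = "right" ∧ pos = "aisle" then
      (PySem.List.pyRange 4 (4 + num) 1).foldl
        (fun st i => (PySem.List.pySetD st.1 i "X", st.2 ++ [i])) st1
    else if side = "right" ∧ pos = "window" then
      (PySem.List.pyRange 6 (6 - num) (-1)).foldl
        (fun st i => (PySem.List.pySetD st.1 i "X", st.2 ++ [i])) st1
    else st1
  let places := PySem.List.sorted st2.2 id false
  -- 'for i in range(len(places)): places[i] = place_letter[places[i]]' rewrites each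
  -- element in place: ported as the elementwise map (KeyError excluded by Pre_)
  let letters := places.map (fun p => place_letter.getD p "")
  (PySem.Str.join "" st2.1, letters)

-- ===== PORT B =====
def place_pass_alt (pos : String) (side : String) (num : Int) (row : List String) : String × List String :=
  let n := if num > 0 then num else 0
  let spans : PySem.Dict (String × String) (Int × Int) :=
    PySem.Dict.ofList [(("left", "aisle"), (3 - n, 3)), (("left", "window"), (0, n)),
                       (("right", "aisle"), (4, 4 + n)), (("right", "window"), (7 - n, 7))]
  let lh := spans.getD (side, pos) (0, 0)
  let lo := lh.1
  let hi := lh.2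
  -- 'ABC DEF'[p]: the table string as the list of its one-char strs (exact for -7 ≤ p < 7)
  let letters := (PySem.List.pyRange lo hi 1).map
    (fun p => PySem.List.pyGetD ["A", "B", "C", " ", "D", "E", "F"] p "")
  let cabin := PySem.Str.join "" ((PySem.List.enumerate row 0).map
    (fun ic => if lo ≤ ic.1 ∧ ic.1 < hi then "X" else ic.2))
  (cabin, letters)

-- ===== PRECONDITION & SPEC =====
-- Pre_ excludes exactly the inputs where the Python A raises: a matched branch whose indices
-- leave the row (IndexError) or leave the letter table {0,1,2,4,5,6} (KeyError, num > 3 or a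
-- negative wrapped index).
def Pre_place_pass (pos : String) (side : String) (num : Int) (row : List String) : Prop :=
  (side = "left" ∧ pos = "aisle" → num ≤ 3 ∧ (num ≤ 0 ∨ 3 ≤ (row.length : Int))) ∧
  (side = "left" ∧ pos = "window" → num ≤ 3 ∧ num ≤ (row.length : Int)) ∧
  (side = "right" ∧ pos = "aisle" → num ≤ 3 ∧ (num ≤ 0 ∨ num + 4 ≤ (row.length : Int))) ∧
  (side = "right" ∧ pos = "window" → num ≤ 3 ∧ (num ≤ 0 ∨ 7 ≤ (row.length : Int)))
instance (pos : String) (side : String) (num : Int) (row : List String) : Decidable (Pre_place_pass pos side num row) := by unfold Pre_place_pass; infer_instance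

def pvWitness_place_pass : String × String × Int × List String :=
  ("aisle", "left", 2, ["a", "b", "c", "d"])

def Spec_place_pass (pos : String) (side : String) (num : Int) (row : List String) (out : String × List String) : Prop := out = place_pass_alt pos side num row
instance (pos : String) (side : String) (num : Int) (row : List String) (out : String × List String) : Decidable (Spec_place_pass pos side num row out) := by unfold Spec_place_pass; infer_instance

-- ===== CLAIM (what is proved, stated in full; the proofs are below) =====
def Claim_equal_place_pass : Prop := ∀ (pos : String) (side : String) (num : Int) (row : List String), Dom_place_pass pos side num row → Pre_place_pass pos side num row → Spec_place_pass pos side num row (place_pass pos side num row)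

-- ===== LEMMAS AND PROOFS =====

-- A's loop threads the pair (row, places): split it into the row fold and the appended indices
theorem foldl_step_split (l : List Int) (r : List String) (acc : List Int) :
    l.foldl (fun (st : List String × List Int) i => (PySem.List.pySetD st.1 i "X", st.2 ++ [i])) (r, acc)
      = (l.foldl (fun r i => PySem.List.pySetD r i "X") r, acc ++ l) := by
  induction l generalizing r acc with
  | nil => simp
  | cons i l ih => simp [List.foldl_cons, ih]

theorem length_foldl_set (l : List Int) (xs : List String) :
    (l.foldl (fun r i => PySem.List.pySetD r i "X") xs).length = xs.length := by
  induction l generalizing xs with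
  | nil => rfl
  | cons i l ih => simp [List.foldl_cons, ih, PySem.List.length_pySetD]

theorem getElem?_foldl_set (l : List Int) (xs : List String)
    (h : ∀ i ∈ l, 0 ≤ i ∧ i < (xs.length : Int)) (k : Nat) (hk : k < xs.length) :
    (l.foldl (fun r i => PySem.List.pySetD r i "X") xs)[k]?
      = if (k : Int) ∈ l then some "X" else xs[k]? := by
  induction l generalizing xs with
  | nil => simp
  | cons i l ih =>
    have hi := h i (List.mem_cons_self ..)
    have hset : PySem.List.pySetD xs i "X" = xs.set i.toNat "X" :=
      PySem.List.pySetD_of_nonneg _ _ hi.1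
    rw [List.foldl_cons, ih (PySem.List.pySetD xs i "X")
      (by rw [hset]; simpa using h ·  ∘ List.mem_cons_of_mem _)
      (by simp [hset]; exact hk)]
    by_cases hmem : (k : Int) ∈ l
    · simp [hmem]
    · by_cases hik : (k : Int) = i
      · have : i.toNat = k := by omega
        simp [hik, hset, this, hk]
      · rw [hset, List.getElem?_set_ne (show i.toNat ≠ k by omega)]
        simp [hmem, hik]

-- A's per-index mutations over an index set [lo,hi) ARE B's single enumerate pass
theorem cabin_eq (l : List Int) (lo hi : Int) (xs : List String)
    (hmem : ∀ k : Int, k ∈ l ↔ lo ≤ k ∧ k < hi)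
    (hrange : ∀ i ∈ l, 0 ≤ i ∧ i < (xs.length : Int)) :
    l.foldl (fun r i => PySem.List.pySetD r i "X") xs
      = (PySem.List.enumerate xs 0).map
          (fun ic => if lo ≤ ic.1 ∧ ic.1 < hi then "X" else ic.2) := by
  apply List.ext_getElem?
  intro k
  by_cases hk : k < xs.length
  · rw [getElem?_foldl_set l xs hrange k hk, List.getElem?_map,
      PySem.List.getElem?_enumerate]
    rw [List.getElem?_eq_getElem hk]
    simp only [Option.map_some, zero_add, hmem]
    split_ifs <;> rfl
  · have h1 : xs.length ≤ k := by omega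
    rw [List.getElem?_eq_none (by rw [length_foldl_set]; exact h1),
      List.getElem?_eq_none (by rw [List.length_map, PySem.List.length_enumerate]; exact h1)]

-- A's letter dict and B's table string agree on every index both can reach
theorem letter_eq (p : Int) (h0 : 0 ≤ p) (h7 : p < 7) (h3 : p ≠ 3) :
    (PySem.Dict.ofList [((0:Int), "A"), (1, "B"), (2, "C"), (4, "D"), (5, "E"), (6, "F")]).getD p ""
      = PySem.List.pyGetD ["A", "B", "C", " ", "D", "E", "F"] p "" := by
  interval_cases p <;> first | rfl | omega

-- B's span lookup misses for a (side, pos) no branch of A matches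
theorem spans_getD_none (side pos : String) (n : Int)
    (h1 : ¬(side = "left" ∧ pos = "aisle")) (h2 : ¬(side = "left" ∧ pos = "window"))
    (h3 : ¬(side = "right" ∧ pos = "aisle")) (h4 : ¬(side = "right" ∧ pos = "window")) :
    (PySem.Dict.ofList [(("left", "aisle"), (3 - n, 3)), (("left", "window"), ((0:Int), n)),
                        (("right", "aisle"), (4, 4 + n)), (("right", "window"), (7 - n, 7))]).getD
        (side, pos) (0, 0) = ((0:Int), (0:Int)) := by
  have e : (PySem.Dict.ofList [(("left", "aisle"), ((3:Int) - n, (3:Int))), (("left", "window"), ((0:Int), n)),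
                       (("right", "aisle"), (4, 4 + n)), (("right", "window"), (7 - n, 7))]).items
      = [(("left", "aisle"), (3 - n, 3)), (("left", "window"), ((0:Int), n)),
                       (("right", "aisle"), (4, 4 + n)), (("right", "window"), (7 - n, 7))] := rfl
  simp only [PySem.Dict.getD, PySem.Dict.get?, e, List.find?]
  simp only [show (∀ a b : String, ((a, b) == (side, pos)) = (decide (a = side) && decide (b = pos))) from fun a b => rfl]
  have d1 : (decide ("left" = side) && decide ("aisle" = pos)) = false := by
    simp only [Bool.and_eq_false_iff, decide_eq_false_iff_not]
    by_contra hc; push Not at hc; exact h1 ⟨hc.1.symm, hc.2.symm⟩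
  have d2 : (decide ("left" = side) && decide ("window" = pos)) = false := by
    simp only [Bool.and_eq_false_iff, decide_eq_false_iff_not]
    by_contra hc; push Not at hc; exact h2 ⟨hc.1.symm, hc.2.symm⟩
  have d3 : (decide ("right" = side) && decide ("aisle" = pos)) = false := by
    simp only [Bool.and_eq_false_iff, decide_eq_false_iff_not]
    by_contra hc; push Not at hc; exact h3 ⟨hc.1.symm, hc.2.symm⟩
  have d4 : (decide ("right" = side) && decide ("window" = pos)) = false := by
    simp only [Bool.and_eq_false_iff, decide_eq_false_iff_not]
    by_contra hc; push Not at hc; exact h4 ⟨hc.1.symm, hc.2.symm⟩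
  rw [d1, d2, d3, d4]
  rfl

-- left/aisle branch
theorem branch_LA (num : Int) (row : List String) (h3 : num ≤ 3)
    (hlen : num ≤ 0 ∨ 3 ≤ (row.length : Int)) :
    place_pass "aisle" "left" num row = place_pass_alt "aisle" "left" num row := by
  have e1 : place_pass "aisle" "left" num row
      = (let st := (PySem.List.pyRange 2 (3 - num - 1) (-1)).foldl
            (fun st i => (PySem.List.pySetD st.1 i "X", st.2 ++ [i])) (row, []);
         (PySem.Str.join "" st.1,
          (PySem.List.sorted st.2 id false).map
            (fun p => (PySem.Dict.ofList [((0:Int), "A"), (1, "B"), (2, "C"), (4, "D"), (5, "E"), (6, "F")]).getD p ""))) := rfl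
  by_cases hn : 0 < num
  · have e2 : place_pass_alt "aisle" "left" num row
        = (PySem.Str.join "" ((PySem.List.enumerate row 0).map
            (fun ic => if 3 - num ≤ ic.1 ∧ ic.1 < 3 then "X" else ic.2)),
           (PySem.List.pyRange (3 - num) 3 1).map
             (fun p => PySem.List.pyGetD ["A", "B", "C", " ", "D", "E", "F"] p "")) := by
      simp only [place_pass_alt, if_pos hn]
      rfl
    have hlen3 : 3 ≤ (row.length : Int) := hlen.resolve_left (by omega)
    have hrw : PySem.List.pyRange 2 (3 - num - 1) (-1) = (PySem.List.pyRange (3 - num) 3 1).reverse := by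
      rw [PySem.List.pyRange_neg_one_eq_reverse]; norm_num
    rw [e1, e2, foldl_step_split]
    refine Prod.ext ?_ ?_
    · show PySem.Str.join "" _ = PySem.Str.join "" _
      refine congrArg _ (cabin_eq _ (3 - num) 3 row ?_ ?_)
      · intro k; rw [PySem.List.mem_pyRange_neg_one]; omega
      · intro i hi; rw [PySem.List.mem_pyRange_neg_one] at hi; omega
    · show (PySem.List.sorted ([] ++ _) id false).map _ = _
      rw [List.nil_append]
      have hsort := PySem.List.sorted_eq_of_perm_of_pairwise_lt
        (PySem.List.pyRange 2 (3 - num - 1) (-1)) (PySem.List.pyRange (3 - num) 3 1) id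
        (by rw [hrw]; exact (List.reverse_perm _).symm) (PySem.List.pairwise_lt_pyRange_one (3 - num) 3)
      rw [hsort]
      refine List.map_congr_left ?_
      intro p hp; rw [PySem.List.mem_pyRange_one] at hp
      exact letter_eq p (by omega) (by omega) (by omega)
  · have e2 : place_pass_alt "aisle" "left" num row
        = (PySem.Str.join "" ((PySem.List.enumerate row 0).map
            (fun ic => if (3:Int) ≤ ic.1 ∧ ic.1 < 3 then "X" else ic.2)),
           (PySem.List.pyRange 3 3 1).map
             (fun p => PySem.List.pyGetD ["A", "B", "C", " ", "D", "E", "F"] p "")) := by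
      simp only [place_pass_alt, if_neg hn]
      rfl
    have hnil : PySem.List.pyRange 2 (3 - num - 1) (-1) = [] :=
      PySem.List.pyRange_neg_one_eq_nil (by omega)
    rw [e1, e2, hnil]
    refine Prod.ext ?_ ?_
    · show PySem.Str.join "" row = PySem.Str.join "" _
      refine congrArg _ ?_
      have hmem : ∀ k : Int, k ∈ ([] : List Int) ↔ 3 ≤ k ∧ k < 3 := by
        intro k
        constructor
        · intro h; simp at h
        · intro h; omega
      have := cabin_eq [] 3 3 row hmem (by simp)
      simpa using this
    · simp [PySem.List.pyRange_one_eq_nil, PySem.List.sorted]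

-- left/window branch
theorem branch_LW (num : Int) (row : List String) (h3 : num ≤ 3)
    (hlen : num ≤ (row.length : Int)) :
    place_pass "window" "left" num row = place_pass_alt "window" "left" num row := by
  have e1 : place_pass "window" "left" num row
      = (let st := (PySem.List.pyRange 0 num 1).foldl
            (fun st i => (PySem.List.pySetD st.1 i "X", st.2 ++ [i])) (row, []);
         (PySem.Str.join "" st.1,
          (PySem.List.sorted st.2 id false).map
            (fun p => (PySem.Dict.ofList [((0:Int), "A"), (1, "B"), (2, "C"), (4, "D"), (5, "E"), (6, "F")]).getD p ""))) := rfl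
  by_cases hn : 0 < num
  · have e2 : place_pass_alt "window" "left" num row
        = (PySem.Str.join "" ((PySem.List.enumerate row 0).map
            (fun ic => if 0 ≤ ic.1 ∧ ic.1 < num then "X" else ic.2)),
           (PySem.List.pyRange 0 num 1).map
             (fun p => PySem.List.pyGetD ["A", "B", "C", " ", "D", "E", "F"] p "")) := by
      simp only [place_pass_alt, if_pos hn]
      rfl
    rw [e1, e2, foldl_step_split]
    refine Prod.ext ?_ ?_
    · show PySem.Str.join "" _ = PySem.Str.join "" _
      refine congrArg _ (cabin_eq _ 0 num row ?_ ?_)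
      · intro k; rw [PySem.List.mem_pyRange_one]
      · intro i hi; rw [PySem.List.mem_pyRange_one] at hi; omega
    · show (PySem.List.sorted ([] ++ _) id false).map _ = _
      rw [List.nil_append]
      have hsort := PySem.List.sorted_eq_of_perm_of_pairwise_lt
        (PySem.List.pyRange 0 num 1) (PySem.List.pyRange 0 num 1) id
        (List.Perm.refl _) (PySem.List.pairwise_lt_pyRange_one 0 num)
      rw [hsort]
      refine List.map_congr_left ?_
      intro p hp; rw [PySem.List.mem_pyRange_one] at hp
      exact letter_eq p (by omega) (by omega) (by omega)
  · have e2 : place_pass_alt "window" "left" num row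
        = (PySem.Str.join "" ((PySem.List.enumerate row 0).map
            (fun ic => if (0:Int) ≤ ic.1 ∧ ic.1 < 0 then "X" else ic.2)),
           (PySem.List.pyRange 0 0 1).map
             (fun p => PySem.List.pyGetD ["A", "B", "C", " ", "D", "E", "F"] p "")) := by
      simp only [place_pass_alt, if_neg hn]
      rfl
    have hnil : PySem.List.pyRange 0 num 1 = [] :=
      PySem.List.pyRange_one_eq_nil (by omega)
    rw [e1, e2, hnil]
    refine Prod.ext ?_ ?_
    · show PySem.Str.join "" row = PySem.Str.join "" _
      refine congrArg _ ?_
      have hmem : ∀ k : Int, k ∈ ([] : List Int) ↔ 0 ≤ k ∧ k < 0 := by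
        intro k
        constructor
        · intro h; simp at h
        · intro h; omega
      have := cabin_eq [] 0 0 row hmem (by simp)
      simpa using this
    · simp [PySem.List.pyRange_one_eq_nil, PySem.List.sorted]

-- right/aisle branch
theorem branch_RA (num : Int) (row : List String) (h3 : num ≤ 3)
    (hlen : num ≤ 0 ∨ num + 4 ≤ (row.length : Int)) :
    place_pass "aisle" "right" num row = place_pass_alt "aisle" "right" num row := by
  have e1 : place_pass "aisle" "right" num row
      = (let st := (PySem.List.pyRange 4 (4 + num) 1).foldl
            (fun st i => (PySem.List.pySetD st.1 i "X", st.2 ++ [i])) (row, []);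
         (PySem.Str.join "" st.1,
          (PySem.List.sorted st.2 id false).map
            (fun p => (PySem.Dict.ofList [((0:Int), "A"), (1, "B"), (2, "C"), (4, "D"), (5, "E"), (6, "F")]).getD p ""))) := rfl
  by_cases hn : 0 < num
  · have e2 : place_pass_alt "aisle" "right" num row
        = (PySem.Str.join "" ((PySem.List.enumerate row 0).map
            (fun ic => if 4 ≤ ic.1 ∧ ic.1 < 4 + num then "X" else ic.2)),
           (PySem.List.pyRange 4 (4 + num) 1).map
             (fun p => PySem.List.pyGetD ["A", "B", "C", " ", "D", "E", "F"] p "")) := by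
      simp only [place_pass_alt, if_pos hn]
      rfl
    have hlen4 : num + 4 ≤ (row.length : Int) := hlen.resolve_left (by omega)
    rw [e1, e2, foldl_step_split]
    refine Prod.ext ?_ ?_
    · show PySem.Str.join "" _ = PySem.Str.join "" _
      refine congrArg _ (cabin_eq _ 4 (4 + num) row ?_ ?_)
      · intro k; rw [PySem.List.mem_pyRange_one]
      · intro i hi; rw [PySem.List.mem_pyRange_one] at hi; omega
    · show (PySem.List.sorted ([] ++ _) id false).map _ = _
      rw [List.nil_append]
      have hsort := PySem.List.sorted_eq_of_perm_of_pairwise_lt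
        (PySem.List.pyRange 4 (4 + num) 1) (PySem.List.pyRange 4 (4 + num) 1) id
        (List.Perm.refl _) (PySem.List.pairwise_lt_pyRange_one 4 (4 + num))
      rw [hsort]
      refine List.map_congr_left ?_
      intro p hp; rw [PySem.List.mem_pyRange_one] at hp
      exact letter_eq p (by omega) (by omega) (by omega)
  · have e2 : place_pass_alt "aisle" "right" num row
        = (PySem.Str.join "" ((PySem.List.enumerate row 0).map
            (fun ic => if (4:Int) ≤ ic.1 ∧ ic.1 < 4 then "X" else ic.2)),
           (PySem.List.pyRange 4 4 1).map
             (fun p => PySem.List.pyGetD ["A", "B", "C", " ", "D", "E", "F"] p "")) := by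
      simp only [place_pass_alt, if_neg hn]
      rfl
    have hnil : PySem.List.pyRange 4 (4 + num) 1 = [] :=
      PySem.List.pyRange_one_eq_nil (by omega)
    rw [e1, e2, hnil]
    refine Prod.ext ?_ ?_
    · show PySem.Str.join "" row = PySem.Str.join "" _
      refine congrArg _ ?_
      have hmem : ∀ k : Int, k ∈ ([] : List Int) ↔ 4 ≤ k ∧ k < 4 := by
        intro k
        constructor
        · intro h; simp at h
        · intro h; omega
      have := cabin_eq [] 4 4 row hmem (by simp)
      simpa using this
    · simp [PySem.List.pyRange_one_eq_nil, PySem.List.sorted]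

-- right/window branch
theorem branch_RW (num : Int) (row : List String) (h3 : num ≤ 3)
    (hlen : num ≤ 0 ∨ 7 ≤ (row.length : Int)) :
    place_pass "window" "right" num row = place_pass_alt "window" "right" num row := by
  have e1 : place_pass "window" "right" num row
      = (let st := (PySem.List.pyRange 6 (6 - num) (-1)).foldl
            (fun st i => (PySem.List.pySetD st.1 i "X", st.2 ++ [i])) (row, []);
         (PySem.Str.join "" st.1,
          (PySem.List.sorted st.2 id false).map
            (fun p => (PySem.Dict.ofList [((0:Int), "A"), (1, "B"), (2, "C"), (4, "D"), (5, "E"), (6, "F")]).getD p ""))) := rfl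
  by_cases hn : 0 < num
  · have e2 : place_pass_alt "window" "right" num row
        = (PySem.Str.join "" ((PySem.List.enumerate row 0).map
            (fun ic => if 7 - num ≤ ic.1 ∧ ic.1 < 7 then "X" else ic.2)),
           (PySem.List.pyRange (7 - num) 7 1).map
             (fun p => PySem.List.pyGetD ["A", "B", "C", " ", "D", "E", "F"] p "")) := by
      simp only [place_pass_alt, if_pos hn]
      rfl
    have hlen7 : 7 ≤ (row.length : Int) := hlen.resolve_left (by omega)
    have hrw : PySem.List.pyRange 6 (6 - num) (-1) = (PySem.List.pyRange (7 - num) 7 1).reverse := by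
      rw [PySem.List.pyRange_neg_one_eq_reverse,
        show (6 - num + 1 : Int) = 7 - num from by ring]
      norm_num
    rw [e1, e2, foldl_step_split]
    refine Prod.ext ?_ ?_
    · show PySem.Str.join "" _ = PySem.Str.join "" _
      refine congrArg _ (cabin_eq _ (7 - num) 7 row ?_ ?_)
      · intro k; rw [PySem.List.mem_pyRange_neg_one]; omega
      · intro i hi; rw [PySem.List.mem_pyRange_neg_one] at hi; omega
    · show (PySem.List.sorted ([] ++ _) id false).map _ = _
      rw [List.nil_append]
      have hsort := PySem.List.sorted_eq_of_perm_of_pairwise_lt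
        (PySem.List.pyRange 6 (6 - num) (-1)) (PySem.List.pyRange (7 - num) 7 1) id
        (by rw [hrw]; exact (List.reverse_perm _).symm) (PySem.List.pairwise_lt_pyRange_one (7 - num) 7)
      rw [hsort]
      refine List.map_congr_left ?_
      intro p hp; rw [PySem.List.mem_pyRange_one] at hp
      exact letter_eq p (by omega) (by omega) (by omega)
  · have e2 : place_pass_alt "window" "right" num row
        = (PySem.Str.join "" ((PySem.List.enumerate row 0).map
            (fun ic => if (7:Int) ≤ ic.1 ∧ ic.1 < 7 then "X" else ic.2)),
           (PySem.List.pyRange 7 7 1).map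
             (fun p => PySem.List.pyGetD ["A", "B", "C", " ", "D", "E", "F"] p "")) := by
      simp only [place_pass_alt, if_neg hn]
      rfl
    have hnil : PySem.List.pyRange 6 (6 - num) (-1) = [] :=
      PySem.List.pyRange_neg_one_eq_nil (by omega)
    rw [e1, e2, hnil]
    refine Prod.ext ?_ ?_
    · show PySem.Str.join "" row = PySem.Str.join "" _
      refine congrArg _ ?_
      have hmem : ∀ k : Int, k ∈ ([] : List Int) ↔ 7 ≤ k ∧ k < 7 := by
        intro k
        constructor
        · intro h; simp at h
        · intro h; omega
      have := cabin_eq [] 7 7 row hmem (by simp)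
      simpa using this
    · simp [PySem.List.pyRange_one_eq_nil, PySem.List.sorted]

-- no branch matches: A leaves the row untouched, B's span lookup misses
theorem branch_none (pos side : String) (num : Int) (row : List String)
    (h1 : ¬(side = "left" ∧ pos = "aisle")) (h2 : ¬(side = "left" ∧ pos = "window"))
    (h3 : ¬(side = "right" ∧ pos = "aisle")) (h4 : ¬(side = "right" ∧ pos = "window")) :
    place_pass pos side num row = place_pass_alt pos side num row := by
  have e1 : place_pass pos side num row = (PySem.Str.join "" row, []) := by
    simp only [place_pass, if_neg h1, if_neg h2, if_neg h3, if_neg h4]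
    rfl
  have e2 : place_pass_alt pos side num row
      = (PySem.Str.join "" ((PySem.List.enumerate row 0).map
          (fun ic => if (0:Int) ≤ ic.1 ∧ ic.1 < 0 then "X" else ic.2)), []) := by
    simp only [place_pass_alt]
    rw [spans_getD_none side pos _ h1 h2 h3 h4]
    rfl
  rw [e1, e2]
  refine Prod.ext ?_ ?_
  · show PySem.Str.join "" row = PySem.Str.join "" _
    refine congrArg _ ?_
    have hmem : ∀ k : Int, k ∈ ([] : List Int) ↔ 0 ≤ k ∧ k < 0 := by
      intro k
      constructor
      · intro h; simp at h
      · intro h; omega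
    have := cabin_eq [] 0 0 row hmem (by simp)
    simpa using this
  · rfl

-- ===== VERDICT (by name: the statement is the Claim_ definition above) =====
theorem place_pass_spec : Claim_equal_place_pass := by
  intro pos side num row _ hpre
  obtain ⟨hLA, hLW, hRA, hRW⟩ := hpre
  show place_pass pos side num row = place_pass_alt pos side num row
  by_cases hsl : side = "left"
  · by_cases hpa : pos = "aisle"
    · subst hsl; subst hpa
      exact branch_LA num row (hLA ⟨rfl, rfl⟩).1 (hLA ⟨rfl, rfl⟩).2
    · by_cases hpw : pos = "window"
      · subst hsl; subst hpw
        exact branch_LW num row (hLW ⟨rfl, rfl⟩).1 (hLW ⟨rfl, rfl⟩).2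
      · subst hsl
        refine branch_none pos "left" num row ?_ ?_ ?_ ?_ <;> simp_all
  · by_cases hsr : side = "right"
    · by_cases hpa : pos = "aisle"
      · subst hsr; subst hpa
        exact branch_RA num row (hRA ⟨rfl, rfl⟩).1 (hRA ⟨rfl, rfl⟩).2
      · by_cases hpw : pos = "window"
        · subst hsr; subst hpw
          exact branch_RW num row (hRW ⟨rfl, rfl⟩).1 (hRW ⟨rfl, rfl⟩).2
        · subst hsr
          refine branch_none pos "right" num row ?_ ?_ ?_ ?_ <;> simp_all
    · refine branch_none pos side num row ?_ ?_ ?_ ?_ <;> simp_all
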